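-- pv_equiv track=rewrite | github.com/al3393/dfh-1 | utility.py | conc_strands
-- ===== SOURCE A (Python) =====
-- def conc_strands(pair1, pair2):
--     ''' Given two tuples, that consists of pairs, say from strand 1, stand 2,
--     concantenates the strand and returns the new tuple
--     for example, if pair1 = ((1,2), (4,2)...)
--     pair2 = ((2,3),(2,1)...
--     This method will return tuple object, ((1,3), (4,1)...'''
--
--     new = []
--     left = list(pair1)
--     right = list(pair2)
--     for l in left:
--         for r in right:
--             if l[1] == r[0]:
--                 new.append((l[0],r[1]))
--     return tuple(new)
-- ===== SOURCE B (Python) =====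
-- def conc_strands(pair1, pair2):
--     index = {}
--     for r in pair2:
--         index.setdefault(r[0], []).append(r[1])
--     new = []
--     for l in pair1:
--         for v in index.get(l[1], []):
--             new.append((l[0], v))
--     return tuple(new)
-- ===== Notes on version B (the rewrite author's own statement) =====
-- stated objective: alternative
-- what changed: B builds a dict index of pair2 keyed by first element once, then for each left pair extends the output from the bucket of matching right seconds, replacing A's inner scan over pair2 (intended as faster; measured 1.29x at the largest size, below the 1.5x bar).
-- outside the precondition, e.g. on conc_strands((), ((1,),)): A returns (), B raises IndexError
import Mathlib
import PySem

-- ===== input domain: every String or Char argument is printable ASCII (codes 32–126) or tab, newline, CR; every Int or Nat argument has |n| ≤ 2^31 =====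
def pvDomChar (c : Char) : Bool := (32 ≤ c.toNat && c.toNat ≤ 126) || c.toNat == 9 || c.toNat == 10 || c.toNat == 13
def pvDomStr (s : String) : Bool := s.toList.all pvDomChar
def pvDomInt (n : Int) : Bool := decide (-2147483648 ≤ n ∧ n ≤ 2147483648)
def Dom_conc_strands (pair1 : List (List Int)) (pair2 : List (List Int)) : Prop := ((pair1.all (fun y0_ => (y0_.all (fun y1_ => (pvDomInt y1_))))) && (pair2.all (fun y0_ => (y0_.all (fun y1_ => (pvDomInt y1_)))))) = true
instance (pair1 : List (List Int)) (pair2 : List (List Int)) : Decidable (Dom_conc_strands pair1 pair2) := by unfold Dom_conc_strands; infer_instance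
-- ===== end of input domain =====

-- B replaces A's nested scan over pair2 by a dict index of pair2 built once (alternative algorithm; speed-up not confirmed).
-- ===== PORT A =====
def pvPg (xs : List Int) (i : Int) : Int := (PySem.List.pyGet? xs i).getD 0

def conc_strands (pair1 : List (List Int)) (pair2 : List (List Int)) : List (List Int) :=
  pair1.foldl (fun acc l =>
    pair2.foldl (fun acc r =>
      if pvPg l 1 = pvPg r 0 then acc ++ [[pvPg l 0, pvPg r 1]] else acc) acc) []

-- ===== PORT B =====
def pvIndex (pair2 : List (List Int)) : PySem.Dict Int (List Int) :=
  pair2.foldl (fun d r => d.modify (pvPg r 0) [] (fun vs => vs ++ [pvPg r 1])) PySem.Dict.empty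

def conc_strands_alt (pair1 : List (List Int)) (pair2 : List (List Int)) : List (List Int) :=
  pair1.foldl (fun acc l =>
    acc ++ ((pvIndex pair2).getD (pvPg l 1) []).map (fun v => [pvPg l 0, v])) []

-- ===== PRECONDITION & SPEC =====
-- Pre_ requires every inner list to have length >= 2: shorter lists make A raise IndexError on
-- pair1 elements or on matched pair2 elements, and B's index build raises on any short pair2 element;
-- it also excludes some inputs A returns on (e.g. an unmatched 1-element pair2 entry), where B raises.
def Pre_conc_strands (pair1 : List (List Int)) (pair2 : List (List Int)) : Prop :=
  (∀ l ∈ pair1, 2 ≤ l.length) ∧ (∀ r ∈ pair2, 2 ≤ r.length)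
instance (pair1 : List (List Int)) (pair2 : List (List Int)) : Decidable (Pre_conc_strands pair1 pair2) := by unfold Pre_conc_strands; infer_instance

def pvWitness_conc_strands : List (List Int) × List (List Int) := ([[1, 2], [4, 2]], [[2, 3], [2, 1]])

def Spec_conc_strands (pair1 : List (List Int)) (pair2 : List (List Int)) (out : List (List Int)) : Prop := out = conc_strands_alt pair1 pair2
instance (pair1 : List (List Int)) (pair2 : List (List Int)) (out : List (List Int)) : Decidable (Spec_conc_strands pair1 pair2 out) := by unfold Spec_conc_strands; infer_instance

-- ===== CLAIM (what is proved, stated in full; the proofs are below) =====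
def Claim_equal_conc_strands : Prop := ∀ (pair1 : List (List Int)) (pair2 : List (List Int)), Dom_conc_strands pair1 pair2 → Pre_conc_strands pair1 pair2 → Spec_conc_strands pair1 pair2 (conc_strands pair1 pair2)

-- ===== LEMMAS AND PROOFS =====
-- The index bucket at key k is exactly the seconds of pair2 entries whose first element is k.
theorem pvIndex_aux (pair2 : List (List Int)) (d : PySem.Dict Int (List Int)) (k : Int) :
    (pair2.foldl (fun d r => d.modify (pvPg r 0) [] (fun vs => vs ++ [pvPg r 1])) d).getD k []
    = d.getD k [] ++ ((pair2.filter (fun r => pvPg r 0 == k)).map (fun r => pvPg r 1)) := by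
  induction pair2 generalizing d with
  | nil => simp
  | cons r rs ih =>
    rw [List.foldl_cons, ih, PySem.Dict.getD_modify]
    by_cases h : k = pvPg r 0
    · simp [h, List.filter_cons, eq_comm]
    · have h' : (pvPg r 0 == k) = false := by simp [Ne.symm h]
      simp [h, List.filter_cons, h']

theorem pvIndex_getD (pair2 : List (List Int)) (k : Int) :
    (pvIndex pair2).getD k [] = ((pair2.filter (fun r => pvPg r 0 == k)).map (fun r => pvPg r 1)) := by
  unfold pvIndex
  rw [pvIndex_aux]
  simp

-- A's inner loop over pair2 appends exactly the bucket contribution for l.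
theorem pvInner (l : List Int) (pair2 : List (List Int)) (acc : List (List Int)) :
    pair2.foldl (fun acc r =>
      if pvPg l 1 = pvPg r 0 then acc ++ [[pvPg l 0, pvPg r 1]] else acc) acc
    = acc ++ ((pvIndex pair2).getD (pvPg l 1) []).map (fun v => [pvPg l 0, v]) := by
  rw [pvIndex_getD, List.map_map]
  induction pair2 generalizing acc with
  | nil => simp
  | cons r rs ih =>
    rw [List.foldl_cons, ih, List.filter_cons]
    by_cases h : pvPg l 1 = pvPg r 0
    · simp [h, Function.comp]
    · have h' : (pvPg r 0 == pvPg l 1) = false := by simp [Ne.symm h]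
      simp [h, h']

-- ===== VERDICT (by name: the statement is the Claim_ definition above) =====
theorem conc_strands_spec : Claim_equal_conc_strands := by
  intro pair1 pair2 _ _
  show conc_strands pair1 pair2 = conc_strands_alt pair1 pair2
  unfold conc_strands conc_strands_alt
  apply PySem.List.foldl_congr_mem
  intro acc l _
  exact pvInner l pair2 acc
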